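-- pv_equiv track=rewrite | github.com/ostadsgo/appa | appa.py | parse_package
-- ===== SOURCE A (Python) =====
-- def parse_package(raw_package: str) -> dict[str, str]:
--     """Parse and extract fields of a package."""
--     package = {}
--     last_name = None
--     lines = raw_package.splitlines()
--     for line in lines:
--         if not line.startswith(" "):
--             name, sep, value = line.partition(":")
--             name = name.lower().strip()
--             value = value.lower().strip()
--
--             package[name] = value
--             last_name = name
--         else:
--             # This is not a field, it is rest of the value that belong to last field's value
--             # Which must added to the last field_value.
--             value = package[last_name] + "  " + line.strip().lower()
--             package.update({last_name: value})
--
--     return package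
-- ===== SOURCE B (Python) =====
-- def parse_package(raw_package: str) -> dict[str, str]:
--     """Parse and extract fields of a package, one record at a time."""
--     package = {}
--     lines = raw_package.splitlines()
--     i = 0
--     while i < len(lines):
--         name, _, value = lines[i].partition(":")
--         name = name.lower().strip()
--         value = value.lower().strip()
--         i += 1
--         while i < len(lines) and lines[i].startswith(" "):
--             value = value + "  " + lines[i].strip().lower()
--             i += 1
--         package[name] = value
--     return package
-- ===== Notes on version B (the rewrite author's own statement) =====
-- stated objective: alternative
-- what changed: B parses one record at a time: it takes a header line, folds the whole run of following indented continuation lines into the value with a single pass, and assigns the field once, instead of A's line-by-line loop that tracks last_name and re-reads and re-writes the dict entry for every continuation line.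
import Mathlib
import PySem

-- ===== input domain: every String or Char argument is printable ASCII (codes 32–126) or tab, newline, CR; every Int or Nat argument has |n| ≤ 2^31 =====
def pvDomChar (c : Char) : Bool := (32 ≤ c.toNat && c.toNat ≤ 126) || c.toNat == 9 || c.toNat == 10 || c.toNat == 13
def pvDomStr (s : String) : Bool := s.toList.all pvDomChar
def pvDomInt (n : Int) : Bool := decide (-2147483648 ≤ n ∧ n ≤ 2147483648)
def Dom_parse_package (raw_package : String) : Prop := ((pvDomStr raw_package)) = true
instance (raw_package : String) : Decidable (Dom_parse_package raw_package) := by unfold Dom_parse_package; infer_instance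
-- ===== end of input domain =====

-- B parses record-at-a-time (header + its run of continuation lines, one assignment per field)
-- instead of A's streaming loop with last_name and repeated dict re-reads; same cost, different decomposition.

-- s.partition(":") restricted to the two components used (name, value); exact: name = text before the
-- first ':', value = text after it ("" when there is no ':'), matching Python's str.partition.
def pvPartitionColon (s : String) : String × String :=
  (String.ofList (s.toList.takeWhile (· ≠ ':')), String.ofList ((s.toList.dropWhile (· ≠ ':')).drop 1))

-- ===== PORT A =====
-- the loop body of A; state = (package, last_name).  In the continuation branch Python reads
-- package[last_name]: when last_name is a string it is always a present key (it was just inserted),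
-- ported with getD; when last_name is None Python raises KeyError — that input is outside
-- Pre_parse_package and the port returns the dict built so far.
def parse_package_goA : List String → PySem.Dict String String → Option String → PySem.Dict String String
  | [], d, _ => d
  | l :: ls, d, last =>
    if !(PySem.Str.startswith l " ") then
      let p := pvPartitionColon l
      let name := PySem.Str.strip (PySem.Str.lower p.1)
      let value := PySem.Str.strip (PySem.Str.lower p.2)
      parse_package_goA ls (d.insert name value) (some name)
    else
      match last with
      | some n => parse_package_goA ls (d.insert n (d.getD n "" ++ "  " ++ PySem.Str.lower (PySem.Str.strip l))) (some n)
      | none => d   -- Python raises KeyError(None) here; excluded by Pre_parse_package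

def parse_package (raw_package : String) : List (String × String) :=
  (parse_package_goA (PySem.Str.splitlines raw_package) PySem.Dict.empty none).items

-- ===== PORT B =====
def pvIndented (l : String) : Bool := PySem.Str.startswith l " "

-- B's outer while loop: consume a header, then (inner while) the run of indented lines after it.
-- The Nat argument is fuel (initially the number of lines) making the while loop's structural
-- recursion total; it never runs out, since each step consumes at least one line.
def parse_package_goB : Nat → List String → PySem.Dict String String → PySem.Dict String String
  | 0, _, d => d
  | _ + 1, [], d => d
  | fuel + 1, h :: ls, d =>
    let p := pvPartitionColon h
    let name := PySem.Str.strip (PySem.Str.lower p.1)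
    let v0 := PySem.Str.strip (PySem.Str.lower p.2)
    let v := (ls.takeWhile pvIndented).foldl
      (fun v c => v ++ "  " ++ PySem.Str.lower (PySem.Str.strip c)) v0
    parse_package_goB fuel (ls.dropWhile pvIndented) (d.insert name v)

def parse_package_alt (raw_package : String) : List (String × String) :=
  (parse_package_goB (PySem.Str.splitlines raw_package).length
    (PySem.Str.splitlines raw_package) PySem.Dict.empty).items

-- ===== PRECONDITION & SPEC =====
-- Pre_ excludes exactly the inputs on which A raises KeyError(None): those whose first line
-- starts with a space (a continuation line before any header).
def Pre_parse_package (raw_package : String) : Prop :=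
  ((PySem.Str.splitlines raw_package).head?.all (fun l => !PySem.Str.startswith l " ")) = true
instance (raw_package : String) : Decidable (Pre_parse_package raw_package) := by
  unfold Pre_parse_package; infer_instance

def pvWitness_parse_package : String := "Name: Foo\n extra\nVer: 1.0"

def Spec_parse_package (raw_package : String) (out : List (String × String)) : Prop := out = parse_package_alt raw_package
instance (raw_package : String) (out : List (String × String)) : Decidable (Spec_parse_package raw_package out) := by unfold Spec_parse_package; infer_instance

-- ===== CLAIM (what is proved, stated in full; the proofs are below) =====
def Claim_equal_parse_package : Prop := ∀ (raw_package : String), Dom_parse_package raw_package → Pre_parse_package raw_package → Spec_parse_package raw_package (parse_package raw_package)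

-- ===== LEMMAS AND PROOFS =====

-- A run of continuation lines, streamed by A into the entry for n, is the single fold B performs.
theorem goA_conts (cs : List String) (rest : List String)
    (d : PySem.Dict String String) (n v : String)
    (h : ∀ c ∈ cs, pvIndented c = true) :
    parse_package_goA (cs ++ rest) (d.insert n v) (some n) =
      parse_package_goA rest
        (d.insert n (cs.foldl (fun v c => v ++ "  " ++ PySem.Str.lower (PySem.Str.strip c)) v))
        (some n) := by
  induction cs generalizing d v with
  | nil => simp
  | cons c cs ih =>
    have hc : pvIndented c = true := h c (by simp)
    simp only [List.cons_append, parse_package_goA, pvIndented] at hc ⊢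
    rw [hc]
    simp only [Bool.not_true, Bool.false_eq_true, if_false, PySem.Dict.getD_insert_self,
      PySem.Dict.insert_insert_self, List.foldl_cons]
    exact ih _ _ (fun x hx => h x (by simp [hx]))

-- After a header for n with current value v, A on the remaining lines equals B restarted at the
-- next header, with the continuation run folded into n's entry.
theorem goB_nil (fuel : Nat) (d : PySem.Dict String String) :
    parse_package_goB fuel [] d = d := by cases fuel <;> rfl

theorem goA_eq_goB (k : Nat) : ∀ (ls : List String), ls.length ≤ k →
    ∀ (d : PySem.Dict String String) (n v : String),
    parse_package_goA ls (d.insert n v) (some n) =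
      parse_package_goB k (ls.dropWhile pvIndented)
        (d.insert n ((ls.takeWhile pvIndented).foldl
          (fun v c => v ++ "  " ++ PySem.Str.lower (PySem.Str.strip c)) v)) := by
  induction k with
  | zero =>
    intro ls hls d n v
    have : ls = [] := List.eq_nil_of_length_eq_zero (Nat.le_zero.mp hls)
    subst this; rfl
  | succ k ih =>
    intro ls hls d n v
    have hsplit := (List.takeWhile_append_dropWhile (p := pvIndented) (l := ls)).symm
    calc parse_package_goA ls (d.insert n v) (some n)
        = parse_package_goA (ls.takeWhile pvIndented ++ ls.dropWhile pvIndented)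
            (d.insert n v) (some n) := by rw [← hsplit]
      _ = parse_package_goA (ls.dropWhile pvIndented)
            (d.insert n ((ls.takeWhile pvIndented).foldl
              (fun v c => v ++ "  " ++ PySem.Str.lower (PySem.Str.strip c)) v)) (some n) :=
          goA_conts _ _ _ _ _ (fun c hc => List.mem_takeWhile_imp hc)
      _ = _ := by
          cases hdrop : ls.dropWhile pvIndented with
          | nil => exact (goB_nil _ _).symm
          | cons h t =>
            have hh : pvIndented h = false := by
              have := List.head_dropWhile_not pvIndented (l := ls) (by simp [hdrop])
              simpa [hdrop] using this
            have ht : t.length ≤ k := by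
              have h1 : (ls.dropWhile pvIndented).length ≤ ls.length :=
                List.length_dropWhile_le _ _
              rw [hdrop] at h1
              simp only [List.length_cons] at h1
              omega
            simp only [parse_package_goA, parse_package_goB, pvIndented] at hh ⊢
            rw [hh]
            simp only [Bool.not_false, if_true]
            exact ih t ht _ _ _

theorem parse_package_goA_eq (ls : List String)
    (hpre : ls.head?.all (fun l => !PySem.Str.startswith l " ") = true) :
    parse_package_goA ls PySem.Dict.empty none =
      parse_package_goB ls.length ls PySem.Dict.empty := by
  cases ls with
  | nil => rfl
  | cons h t =>
    have hh : PySem.Str.startswith h " " = false := by simpa using hpre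
    simp only [parse_package_goA, hh, Bool.not_false, if_true]
    exact goA_eq_goB t.length t (Nat.le_refl _) _ _ _

-- ===== VERDICT (by name: the statement is the Claim_ definition above) =====
theorem parse_package_spec : Claim_equal_parse_package := by
  intro raw _ hpre
  unfold Spec_parse_package parse_package parse_package_alt
  rw [parse_package_goA_eq _ hpre]
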